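-- pv_equiv track=rewrite | github.com/Macmod/chungus-2-disassembler | utils.py | strip_nops
-- ===== SOURCE A (Python) =====
-- def strip_nops(assembly):
--     limit = len(assembly)
--     for k in range(len(assembly)-1,0,-1):
--         if assembly[k] == '0'*16:
--             limit = k
--         else:
--             break
--
--     return assembly[:limit]
-- ===== SOURCE B (Python) =====
-- def strip_nops(assembly):
--     nop = '0' * 16
--     limit = 1
--     for i in range(1, len(assembly)):
--         if assembly[i] != nop:
--             limit = i + 1
--     return assembly[:limit]
-- ===== Notes on version B (the rewrite author's own statement) =====
-- stated objective: alternative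
-- what changed: Replaced A's backward scan that early-breaks at the first non-NOP word with a single forward pass that tracks the end of the prefix to keep (last non-NOP index + 1, floored at 1) and slices once at the end.
import Mathlib
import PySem

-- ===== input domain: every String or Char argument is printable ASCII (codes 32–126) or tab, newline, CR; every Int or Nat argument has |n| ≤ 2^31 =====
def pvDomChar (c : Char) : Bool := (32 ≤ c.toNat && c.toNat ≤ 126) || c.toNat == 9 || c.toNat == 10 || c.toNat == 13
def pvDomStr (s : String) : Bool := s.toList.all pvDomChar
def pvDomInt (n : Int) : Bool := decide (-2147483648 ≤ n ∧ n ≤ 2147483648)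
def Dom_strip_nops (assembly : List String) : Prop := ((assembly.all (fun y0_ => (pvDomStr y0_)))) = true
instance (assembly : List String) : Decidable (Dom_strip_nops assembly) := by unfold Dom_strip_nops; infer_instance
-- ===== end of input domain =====

-- B replaces A's backward early-breaking scan by a single forward pass that tracks
-- the end of the kept prefix (objective: alternative decomposition, same cost).

-- ===== PORT A =====
-- '0'*16
def pvNop : String := "0000000000000000"

-- the 'for k in range(len(assembly)-1,0,-1): … break' loop, carrying 'limit'
def stripA_loop (asm : List String) : List Int → Int → Int
  | [], limit => limit
  | k :: ks, limit =>
      if PySem.List.pyGetD asm k "" = pvNop then stripA_loop asm ks k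
      else limit

def strip_nops (assembly : List String) : List String :=
  let limit : Int := (assembly.length : Int)
  let limit := stripA_loop assembly (PySem.List.pyRange ((assembly.length : Int) - 1) 0 (-1)) limit
  PySem.List.slice assembly none (some limit)

-- ===== PORT B =====
def strip_nops_alt (assembly : List String) : List String :=
  let limit : Int :=
    (PySem.List.pyRange 1 (assembly.length : Int) 1).foldl
      (fun lim i => if PySem.List.pyGetD assembly i "" ≠ pvNop then i + 1 else lim) 1
  PySem.List.slice assembly none (some limit)

-- ===== PRECONDITION & SPEC =====
def Spec_strip_nops (assembly : List String) (out : List String) : Prop := out = strip_nops_alt assembly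
instance (assembly : List String) (out : List String) : Decidable (Spec_strip_nops assembly out) := by unfold Spec_strip_nops; infer_instance

-- ===== CLAIM (what is proved, stated in full; the proofs are below) =====
def Claim_equal_strip_nops : Prop := ∀ (assembly : List String), Dom_strip_nops assembly → Spec_strip_nops assembly (strip_nops assembly)

-- ===== LEMMAS AND PROOFS =====

-- the two loops compute the same limit: backward-with-break from m vs forward fold up to m
theorem strip_nops_loops_eq (asm : List String) (m : Nat) :
    stripA_loop asm (PySem.List.pyRange (m : Int) 0 (-1)) ((m : Int) + 1) =
    (PySem.List.pyRange 1 ((m : Int) + 1) 1).foldl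
      (fun lim i => if PySem.List.pyGetD asm i "" ≠ pvNop then i + 1 else lim) 1 := by
  induction m with
  | zero =>
      rw [PySem.List.pyRange_neg_one_eq_nil (by norm_num),
        PySem.List.pyRange_one_eq_nil (by norm_num)]
      rfl
  | succ m ih =>
      have h1 : ((m + 1 : Nat) : Int) = (m : Int) + 1 := by push_cast; ring
      rw [h1, PySem.List.pyRange_neg_one_cons (by positivity),
        PySem.List.pyRange_one_succ_right (by omega), List.foldl_append]
      simp only [List.foldl_cons, List.foldl_nil]
      have h2 : (m : Int) + 1 - 1 = (m : Int) := by ring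
      by_cases h : PySem.List.pyGetD asm ((m : Int) + 1) "" = pvNop
      · rw [stripA_loop, if_pos h, if_neg (by simpa using h), h2, ih]
      · rw [stripA_loop, if_neg h, if_pos (by simpa using h)]

-- ===== VERDICT (by name: the statement is the Claim_ definition above) =====
theorem strip_nops_spec : Claim_equal_strip_nops := by
  intro assembly _
  unfold Spec_strip_nops strip_nops strip_nops_alt
  cases assembly with
  | nil => rfl
  | cons a as =>
      have hlen : ((a :: as).length : Int) = ((as.length : Nat) : Int) + 1 := by
        simp
      simp only [hlen]
      rw [show ((as.length : Nat) : Int) + 1 - 1 = ((as.length : Nat) : Int) from by ring,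
        strip_nops_loops_eq]
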